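-- pv_equiv track=rewrite | github.com/Vincent-B-Faust/EEG_HMM | sleep_hmm/utils.py | choose_feature_subset
-- ===== SOURCE A (Python) =====
-- def choose_feature_subset(columns: list[str], max_features: int) -> list[str]:
--     if len(columns) <= max_features:
--         return columns
--     priority = [
--         "eeg_energy",
--         "emg_energy",
--         "eeg_peak_to_peak",
--         "emg_peak_to_peak",
--         "eeg_zcr",
--         "emg_zcr",
--         "eeg_peak_count",
--         "emg_peak_count",
--         "eeg_dominant_frequency",
--         "eeg_spectral_entropy",
--     ]
--     ordered = [name for name in priority if name in columns]
--     ordered.extend(name for name in columns if name not in ordered)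
--     return ordered[:max_features]
-- ===== SOURCE B (Python) =====
-- def choose_feature_subset(columns: list[str], max_features: int) -> list[str]:
--     if len(columns) <= max_features:
--         return columns
--     rank = {
--         "eeg_energy": 0,
--         "emg_energy": 1,
--         "eeg_peak_to_peak": 2,
--         "emg_peak_to_peak": 3,
--         "eeg_zcr": 4,
--         "emg_zcr": 5,
--         "eeg_peak_count": 6,
--         "emg_peak_count": 7,
--         "eeg_dominant_frequency": 8,
--         "eeg_spectral_entropy": 9,
--     }
--     buckets = [[] for _ in range(11)]
--     seen = set()
--     for name in columns:
--         if name not in seen: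
--             seen.add(name)
--             buckets[rank.get(name, 10)].append(name)
--     out = []
--     for bucket in buckets:
--         out += bucket
--     return out[:max_features]
-- ===== Notes on version B (the rewrite author's own statement) =====
-- stated objective: faster
-- what changed: Replaces A's two filtering passes (priority scanned against columns, then a lazily-growing dedup/extend pass with linear membership scans over the growing result) by a single bucket-sort pass: a rank table, 11 buckets filled in one sweep over columns with a seen-set, then concatenated.
import Mathlib
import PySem

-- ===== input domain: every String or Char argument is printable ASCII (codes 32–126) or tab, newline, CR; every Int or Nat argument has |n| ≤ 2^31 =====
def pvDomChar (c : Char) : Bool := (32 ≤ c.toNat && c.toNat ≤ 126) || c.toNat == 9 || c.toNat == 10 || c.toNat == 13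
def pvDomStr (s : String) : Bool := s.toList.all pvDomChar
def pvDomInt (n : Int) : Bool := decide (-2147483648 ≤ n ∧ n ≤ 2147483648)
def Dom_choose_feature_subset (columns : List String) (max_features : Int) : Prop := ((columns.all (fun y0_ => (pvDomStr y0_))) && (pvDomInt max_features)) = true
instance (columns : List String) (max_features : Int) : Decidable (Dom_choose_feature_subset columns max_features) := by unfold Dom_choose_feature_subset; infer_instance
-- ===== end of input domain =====

-- B replaces A's two filtering passes by a one-pass bucket sort over a rank table (measurably faster; return value proved equal).


-- ===== PORT A =====
def choose_feature_subset (columns : List String) (max_features : Int) : List String :=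
  if (columns.length : Int) ≤ max_features then columns
  else
    let priority : List String :=
      ["eeg_energy", "emg_energy", "eeg_peak_to_peak", "emg_peak_to_peak", "eeg_zcr",
       "emg_zcr", "eeg_peak_count", "emg_peak_count", "eeg_dominant_frequency", "eeg_spectral_entropy"]
    let ordered := priority.filter (fun name => columns.contains name)
    -- ordered.extend(name for name in columns if name not in ordered): the generator is consumed
    -- lazily while ordered grows, so each name is tested against the list built so far
    let ordered := columns.foldl (fun acc name => if acc.contains name then acc else acc ++ [name]) ordered
    PySem.List.slice ordered none (some max_features)

-- ===== PORT B =====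
def choose_feature_subset_alt (columns : List String) (max_features : Int) : List String :=
  if (columns.length : Int) ≤ max_features then columns
  else
    let rank : PySem.Dict String Int := PySem.Dict.mk
      [("eeg_energy", 0), ("emg_energy", 1), ("eeg_peak_to_peak", 2), ("emg_peak_to_peak", 3),
       ("eeg_zcr", 4), ("emg_zcr", 5), ("eeg_peak_count", 6), ("emg_peak_count", 7),
       ("eeg_dominant_frequency", 8), ("eeg_spectral_entropy", 9)]
    -- one pass: a seen-set plus 11 buckets; buckets[rank.get(name, 10)].append(name).
    -- The bucket index rank.getD name 10 is always in 0..10, so .toNat / List.modify is exact here.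
    let st := columns.foldl
      (fun (st : PySem.Set String × List (List String)) name =>
        if PySem.Set.contains st.1 name then st
        else (PySem.Set.add st.1 name, st.2.modify (rank.getD name 10).toNat (· ++ [name])))
      (PySem.Set.empty, List.replicate 11 [])
    let out := st.2.foldl (fun acc bucket => acc ++ bucket) []
    PySem.List.slice out none (some max_features)

-- ===== PRECONDITION & SPEC =====
def Spec_choose_feature_subset (columns : List String) (max_features : Int) (out : List String) : Prop := out = choose_feature_subset_alt columns max_features
instance (columns : List String) (max_features : Int) (out : List String) : Decidable (Spec_choose_feature_subset columns max_features out) := by unfold Spec_choose_feature_subset; infer_instance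

-- ===== CLAIM (what is proved, stated in full; the proofs are below) =====
def Claim_equal_choose_feature_subset : Prop := ∀ (columns : List String) (max_features : Int), Dom_choose_feature_subset columns max_features → Spec_choose_feature_subset columns max_features (choose_feature_subset columns max_features)

-- ===== LEMMAS AND PROOFS =====

def pvP : List String :=
  ["eeg_energy", "emg_energy", "eeg_peak_to_peak", "emg_peak_to_peak", "eeg_zcr",
   "emg_zcr", "eeg_peak_count", "emg_peak_count", "eeg_dominant_frequency", "eeg_spectral_entropy"]

-- the rank of a name: its index in pvP, or 10 when absent
def pvKey (n : String) : Int :=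
  if n = "eeg_energy" then 0 else if n = "emg_energy" then 1
  else if n = "eeg_peak_to_peak" then 2 else if n = "emg_peak_to_peak" then 3
  else if n = "eeg_zcr" then 4 else if n = "emg_zcr" then 5
  else if n = "eeg_peak_count" then 6 else if n = "emg_peak_count" then 7
  else if n = "eeg_dominant_frequency" then 8 else if n = "eeg_spectral_entropy" then 9
  else 10

def pvKs : List Int := [0, 1, 2, 3, 4, 5, 6, 7, 8, 9, 10]

def pvBuckets (ks : List Int) (l : List String) : List String :=
  ks.flatMap (fun i => l.filter (fun n => pvKey n == i))

def pvRank : PySem.Dict String Int := PySem.Dict.mk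
  [("eeg_energy", 0), ("emg_energy", 1), ("eeg_peak_to_peak", 2), ("emg_peak_to_peak", 3),
   ("eeg_zcr", 4), ("emg_zcr", 5), ("eeg_peak_count", 6), ("emg_peak_count", 7),
   ("eeg_dominant_frequency", 8), ("eeg_spectral_entropy", 9)]

lemma pvKey_bounds (n : String) : 0 ≤ pvKey n ∧ pvKey n ≤ 10 := by
  unfold pvKey; split_ifs <;> omega

-- one split of pvKey's if-chain, giving every characterization at once
lemma pvKey_spec (n : String) :
    (pvKey n = 0 ↔ n = "eeg_energy") ∧ (pvKey n = 1 ↔ n = "emg_energy") ∧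
    (pvKey n = 2 ↔ n = "eeg_peak_to_peak") ∧ (pvKey n = 3 ↔ n = "emg_peak_to_peak") ∧
    (pvKey n = 4 ↔ n = "eeg_zcr") ∧ (pvKey n = 5 ↔ n = "emg_zcr") ∧
    (pvKey n = 6 ↔ n = "eeg_peak_count") ∧ (pvKey n = 7 ↔ n = "emg_peak_count") ∧
    (pvKey n = 8 ↔ n = "eeg_dominant_frequency") ∧ (pvKey n = 9 ↔ n = "eeg_spectral_entropy") ∧
    (pvKey n = 10 ↔ n ∉ pvP) := by
  unfold pvKey
  split_ifs <;> first
    | (subst_vars; decide)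
    | simp_all [pvP]

lemma pvRank_getD (n : String) : pvRank.getD n 10 = pvKey n := by
  by_cases h0 : n = "eeg_energy"
  · subst h0; decide
  by_cases h1 : n = "emg_energy"
  · subst h1; decide
  by_cases h2 : n = "eeg_peak_to_peak"
  · subst h2; decide
  by_cases h3 : n = "emg_peak_to_peak"
  · subst h3; decide
  by_cases h4 : n = "eeg_zcr"
  · subst h4; decide
  by_cases h5 : n = "emg_zcr"
  · subst h5; decide
  by_cases h6 : n = "eeg_peak_count"
  · subst h6; decide
  by_cases h7 : n = "emg_peak_count"
  · subst h7; decide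
  by_cases h8 : n = "eeg_dominant_frequency"
  · subst h8; decide
  by_cases h9 : n = "eeg_spectral_entropy"
  · subst h9; decide
  have e0 : ("eeg_energy" == n) = false := by simp [Ne.symm h0]
  have e1 : ("emg_energy" == n) = false := by simp [Ne.symm h1]
  have e2 : ("eeg_peak_to_peak" == n) = false := by simp [Ne.symm h2]
  have e3 : ("emg_peak_to_peak" == n) = false := by simp [Ne.symm h3]
  have e4 : ("eeg_zcr" == n) = false := by simp [Ne.symm h4]
  have e5 : ("emg_zcr" == n) = false := by simp [Ne.symm h5]
  have e6 : ("eeg_peak_count" == n) = false := by simp [Ne.symm h6]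
  have e7 : ("emg_peak_count" == n) = false := by simp [Ne.symm h7]
  have e8 : ("eeg_dominant_frequency" == n) = false := by simp [Ne.symm h8]
  have e9 : ("eeg_spectral_entropy" == n) = false := by simp [Ne.symm h9]
  unfold pvRank pvKey
  simp [PySem.Dict.getD, PySem.Dict.get?,
        e0, e1, e2, e3, e4, e5, e6, e7, e8, e9,
        h0, h1, h2, h3, h4, h5, h6, h7, h8, h9]

def pvBucketsList (l : List String) : List (List String) :=
  pvKs.map (fun i => l.filter (fun n => pvKey n == i))

lemma pv_bucketsList_snoc (u : List String) (x : String) :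
    pvBucketsList (u ++ [x]) = (pvBucketsList u).modify (pvKey x).toNat (· ++ [x]) := by
  obtain ⟨hb1, hb2⟩ := pvKey_bounds x
  unfold pvBucketsList pvKs
  simp only [List.map_cons, List.map_nil, List.filter_append]
  interval_cases h : pvKey x <;>
    simp [List.modify, h]

lemma pv_foldl_append_acc (L : List (List String)) :
    ∀ acc : List String, L.foldl (fun acc bucket => acc ++ bucket) acc = acc ++ L.flatten := by
  induction L with
  | nil => intro acc; simp
  | cons a t ih => intro acc; simp [ih, List.append_assoc]

-- the one-pass fold of B fills bucket i with the rank-i names of the dedup, in order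
lemma pv_fold_state (columns : List String) :
    (columns.foldl
      (fun (st : PySem.Set String × List (List String)) name =>
        if PySem.Set.contains st.1 name then st
        else (PySem.Set.add st.1 name, st.2.modify (pvRank.getD name 10).toNat (· ++ [name])))
      (PySem.Set.empty, List.replicate 11 []))
    = (PySem.Set.ofList columns, pvBucketsList (PySem.List.dedup columns)) := by
  induction columns using List.reverseRecOn with
  | nil => rfl
  | append_singleton l x ih =>
      rw [List.foldl_append, List.foldl_cons, List.foldl_nil, ih]
      have hofl : PySem.Set.ofList (l ++ [x]) = PySem.Set.add (PySem.Set.ofList l) x := by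
        rw [PySem.Set.ofList_eq_foldl, PySem.Set.ofList_eq_foldl, List.foldl_append]
        rfl
      have hcm : PySem.Set.contains (PySem.Set.ofList l) x = decide (x ∈ l) := by
        have he : PySem.Set.contains (PySem.Set.ofList l) x = (PySem.Set.ofList l).contains x := rfl
        rw [he]
        by_cases hx : x ∈ l
        · simp [List.contains_eq_mem, (PySem.Set.mem_ofList l x).mpr hx, hx]
        · simp [List.contains_eq_mem, hx, PySem.Set.mem_ofList]
      have hded : PySem.List.dedup (l ++ [x])
          = if x ∈ l then PySem.List.dedup l else PySem.List.dedup l ++ [x] := by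
        show PySem.Set.ofList (l ++ [x]) = _
        rw [hofl]
        show (if (PySem.Set.ofList l).contains x then PySem.Set.ofList l
              else PySem.Set.ofList l ++ [x]) = _
        by_cases hx : x ∈ l
        · simp [List.contains_eq_mem, (PySem.Set.mem_ofList l x).mpr hx, hx]
        · have hnx : x ∉ PySem.Set.ofList l := fun h => hx ((PySem.Set.mem_ofList l x).mp h)
          simp [List.contains_eq_mem, hnx, hx]
      by_cases hx : x ∈ l
      · have hadd : PySem.Set.add (PySem.Set.ofList l) x = PySem.Set.ofList l := by
          show (if (PySem.Set.ofList l).contains x then _ else _) = _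
          simp [List.contains_eq_mem, (PySem.Set.mem_ofList l x).mpr hx]
        rw [hcm]
        simp only [hx, decide_true, if_true]
        rw [hofl, hded, hadd]
        simp [hx]
      · rw [hcm]
        simp only [hx, decide_false, Bool.false_eq_true, if_false]
        rw [hofl, hded, pvRank_getD]
        simp only [hx, if_false]
        rw [pv_bucketsList_snoc]

lemma pv_fold_buckets (columns : List String) :
    (columns.foldl
      (fun (st : PySem.Set String × List (List String)) name =>
        if PySem.Set.contains st.1 name then st
        else (PySem.Set.add st.1 name, st.2.modify (pvRank.getD name 10).toNat (· ++ [name])))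
      (PySem.Set.empty, List.replicate 11 [])).2.foldl (fun acc bucket => acc ++ bucket) []
    = pvBuckets pvKs (PySem.List.dedup columns) := by
  rw [pv_fold_state]
  rw [pv_foldl_append_acc, List.nil_append]
  unfold pvBuckets pvBucketsList
  rw [List.flatMap_def]

-- the dedup/extend foldl of A, generalized over the accumulator
lemma pv_foldl_step (l : List String) :
    ∀ acc : List String,
      l.foldl (fun acc name => if acc.contains name then acc else acc ++ [name]) acc
        = acc ++ (PySem.List.dedup l).filter (fun n => !acc.contains n) := by
  have hded : ∀ u : List String, PySem.List.dedup u
      = u.foldl (fun acc name => if acc.contains name then acc else acc ++ [name]) [] := by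
    intro u
    show PySem.Set.ofList u = _
    rw [PySem.Set.ofList]
    rfl
  induction l with
  | nil => intro acc; simp
  | cons n t ih =>
      intro acc
      rw [List.foldl_cons, ih, hded (n :: t), List.foldl_cons, ih]
      have hn0 : ([] : List String).contains n = false := rfl
      simp only [hn0, Bool.false_eq_true, if_false, List.nil_append]
      by_cases hc : acc.contains n
      · simp only [hc, if_true, List.filter_append, List.filter_cons]
        simp only [Bool.not_true, Bool.false_eq_true, if_false, List.filter_nil, List.nil_append]
        congr 1
        rw [List.filter_filter]
        apply List.filter_congr
        intro m _
        by_cases hmn : m = n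
        · subst hmn; rw [hc]; simp
        · simp [List.contains_eq_mem, hmn]
      · simp only [hc, Bool.false_eq_true, if_false, List.filter_append, List.filter_cons]
        simp only [Bool.not_false, if_true, List.filter_nil]
        simp only [List.append_assoc, List.cons_append, List.nil_append]
        congr 2
        rw [List.filter_filter]
        apply List.filter_congr
        intro m _
        by_cases hmn : m = n
        · subst hmn; simp [List.contains_eq_mem]
        · simp [List.contains_eq_mem, hmn]

lemma pv_filter_singleton (p : String) (l : List String) (hl : l.Nodup) :
    l.filter (fun n => n == p) = if p ∈ l then [p] else [] := by
  induction l with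
  | nil => simp
  | cons a t ih =>
      rcases List.nodup_cons.mp hl with ⟨ha, ht⟩
      by_cases hap : a = p
      · subst hap; simp [ih ht, ha]
      · simp [hap, ih ht, Ne.symm hap]

lemma pv_filter_eq_flatMap (f : String → Bool) (L : List String) :
    L.filter f = L.flatMap (fun p => if f p then [p] else []) := by
  induction L with
  | nil => rfl
  | cons a t ih => by_cases h : f a <;> simp [h, ih]

set_option maxHeartbeats 1000000 in
lemma pv_orderedA_eq_buckets (columns : List String) :
    (pvP.filter (fun name => columns.contains name)) ++
      (PySem.List.dedup columns).filter
        (fun n => !(pvP.filter (fun name => columns.contains name)).contains n)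
      = pvBuckets pvKs (PySem.List.dedup columns) := by
  have hnd : (PySem.List.dedup columns).Nodup := PySem.List.nodup_dedup columns
  have hmemD : ∀ n, n ∈ PySem.List.dedup columns ↔ n ∈ columns := PySem.List.mem_dedup columns
  have hchunk : ∀ (i : Int) (p : String), (∀ n : String, pvKey n = i ↔ n = p) →
      (PySem.List.dedup columns).filter (fun n => pvKey n == i)
        = if columns.contains p then [p] else [] := by
    intro i p hiff
    rw [List.filter_congr (by intro n _; show (pvKey n == i) = (n == p); simp [hiff n])]
    rw [pv_filter_singleton p _ hnd]
    simp [List.contains_eq_mem]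
  have hlast : (PySem.List.dedup columns).filter (fun n => pvKey n == 10)
      = (PySem.List.dedup columns).filter (fun n => !pvP.contains n) := by
    apply List.filter_congr
    intro n _
    show (pvKey n == 10) = !pvP.contains n
    have h10 := (pvKey_spec n).2.2.2.2.2.2.2.2.2.2
    by_cases hm : n ∈ pvP
    · have hne : pvKey n ≠ 10 := fun hh => (h10.mp hh) hm
      simp [List.contains_eq_mem, hm, hne]
    · simp [List.contains_eq_mem, hm, h10.mpr hm]
  have hpart2 : (PySem.List.dedup columns).filter
      (fun n => !(pvP.filter (fun name => columns.contains name)).contains n)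
      = (PySem.List.dedup columns).filter (fun n => !pvP.contains n) := by
    apply List.filter_congr
    intro n hn
    have hnc : n ∈ columns := (hmemD n).mp hn
    simp [List.contains_eq_mem, List.mem_filter, hnc]
  rw [hpart2]
  show _ ++ _ = pvBuckets [0,1,2,3,4,5,6,7,8,9,10] _
  simp only [pvBuckets, List.flatMap_cons, List.flatMap_nil, List.append_nil]
  rw [hchunk 0 "eeg_energy" (fun n => (pvKey_spec n).1),
      hchunk 1 "emg_energy" (fun n => (pvKey_spec n).2.1),
      hchunk 2 "eeg_peak_to_peak" (fun n => (pvKey_spec n).2.2.1),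
      hchunk 3 "emg_peak_to_peak" (fun n => (pvKey_spec n).2.2.2.1),
      hchunk 4 "eeg_zcr" (fun n => (pvKey_spec n).2.2.2.2.1),
      hchunk 5 "emg_zcr" (fun n => (pvKey_spec n).2.2.2.2.2.1),
      hchunk 6 "eeg_peak_count" (fun n => (pvKey_spec n).2.2.2.2.2.2.1),
      hchunk 7 "emg_peak_count" (fun n => (pvKey_spec n).2.2.2.2.2.2.2.1),
      hchunk 8 "eeg_dominant_frequency" (fun n => (pvKey_spec n).2.2.2.2.2.2.2.2.1),
      hchunk 9 "eeg_spectral_entropy" (fun n => (pvKey_spec n).2.2.2.2.2.2.2.2.2.1),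
      hlast]
  rw [pv_filter_eq_flatMap]
  simp [pvP, List.flatMap_cons, List.append_assoc]

-- ===== VERDICT (by name: the statement is the Claim_ definition above) =====
theorem choose_feature_subset_spec : Claim_equal_choose_feature_subset := by
  intro columns max_features _
  unfold Spec_choose_feature_subset choose_feature_subset choose_feature_subset_alt
  by_cases h : (columns.length : Int) ≤ max_features
  · simp [h]
  · simp only [h, if_false]
    congr 1
    rw [show (["eeg_energy", "emg_energy", "eeg_peak_to_peak", "emg_peak_to_peak", "eeg_zcr",
       "emg_zcr", "eeg_peak_count", "emg_peak_count", "eeg_dominant_frequency",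
       "eeg_spectral_entropy"] : List String) = pvP from rfl]
    rw [show (PySem.Dict.mk
      [("eeg_energy", 0), ("emg_energy", 1), ("eeg_peak_to_peak", 2), ("emg_peak_to_peak", 3),
       ("eeg_zcr", 4), ("emg_zcr", 5), ("eeg_peak_count", 6), ("emg_peak_count", 7),
       ("eeg_dominant_frequency", 8), ("eeg_spectral_entropy", 9)] : PySem.Dict String Int) = pvRank from rfl]
    rw [pv_fold_buckets, pv_foldl_step, ← pv_orderedA_eq_buckets columns]
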